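-- pv_equiv track=rewrite | github.com/bvandenabbeele/AdventOfCode | 2025/day_01/main.py | part_2
-- ===== SOURCE A (Python) =====
-- def part_2(data: list[int]) -> int:
--     x = 50
--     zeros = 0
--     for y in data:
--         # means x > y
--         # if y negative, never a crossover
--         if x + y > 0:
--             zeros += (x+y)//100
--         # means x < y and y negative
--         # if x == -y after rotation i, and y < 0 for rotation i + 1, crossover is counted twice.
--         # hence the if statement
--         else:
--             zeros += abs(x+y)//100 + (1 if x != 0 else 0)
--
--         x = (x + y)%100
--
--     return zeros
-- ===== SOURCE B (Python) =====
-- def part_2(data):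
--     # Stage 1: absolute positions visited (prefix sums from 50).
--     prefix = [50]
--     for y in data:
--         prefix.append(prefix[-1] + y)
--     # Stage 2: branchless count of multiples of 100 crossed between consecutive
--     # positions: arrival endpoint counts, departure endpoint does not, in either
--     # direction; the wrong-direction term of the max is never positive.
--     return sum(max(a // 100 - b // 100, (b - 1) // 100 - (a - 1) // 100)
--                for b, a in zip(prefix, prefix[1:]))
-- ===== Notes on version B (the rewrite author's own statement) =====
-- stated objective: alternative
-- what changed: B is two staged passes: it first materialises the list of absolute prefix positions, then sums a branchless max-of-floor-divisions crossing count over consecutive pairs, replacing A's single stateful loop with mod-100 position, abs() branch and x != 0 guard.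
import Mathlib
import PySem

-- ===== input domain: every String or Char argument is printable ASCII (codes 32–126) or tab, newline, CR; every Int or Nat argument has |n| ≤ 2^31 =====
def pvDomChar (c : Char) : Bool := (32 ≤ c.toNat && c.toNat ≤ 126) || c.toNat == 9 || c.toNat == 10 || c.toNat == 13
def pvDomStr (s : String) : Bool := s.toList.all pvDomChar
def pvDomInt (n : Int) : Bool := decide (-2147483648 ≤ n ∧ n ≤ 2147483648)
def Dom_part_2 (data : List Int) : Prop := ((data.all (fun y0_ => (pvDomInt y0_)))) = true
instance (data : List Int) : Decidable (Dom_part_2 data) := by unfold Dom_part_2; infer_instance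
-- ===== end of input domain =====

-- B replaces A's single stateful mod-100 loop by two staged passes: build the list of
-- absolute prefix positions, then sum a branchless crossing count over consecutive pairs.

-- ===== PORT A =====
def part2Step (s : Int × Int) (y : Int) : Int × Int :=
  let x := s.1
  let zeros := s.2
  let zeros' :=
    if x + y > 0 then zeros + PySem.Int.floordiv (x + y) 100
    else zeros + PySem.Int.floordiv |x + y| 100 + (if x ≠ 0 then 1 else 0)
  (PySem.Int.mod (x + y) 100, zeros')

def part_2 (data : List Int) : Int :=
  (data.foldl part2Step (50, 0)).2

-- ===== PORT B =====
-- stage 1 of Source B: prefix = [50]; for y in data: prefix.append(prefix[-1] + y)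
def part2AltPrefix (data : List Int) : List Int :=
  data.foldl (fun acc y => acc ++ [acc.getLast! + y]) [50]

-- the summand of Source B's stage-2 generator
def part2AltCross (b a : Int) : Int :=
  max (PySem.Int.floordiv a 100 - PySem.Int.floordiv b 100)
      (PySem.Int.floordiv (b - 1) 100 - PySem.Int.floordiv (a - 1) 100)

def part_2_alt (data : List Int) : Int :=
  let pfx := part2AltPrefix data
  (((pfx.zip pfx.tail).map (fun p => part2AltCross p.1 p.2)).sum)

-- ===== PRECONDITION & SPEC =====
def Spec_part_2 (data : List Int) (out : Int) : Prop := out = part_2_alt data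
instance (data : List Int) (out : Int) : Decidable (Spec_part_2 data out) := by unfold Spec_part_2; infer_instance

-- ===== CLAIM (what is proved, stated in full; the proofs are below) =====
def Claim_equal_part_2 : Prop := ∀ (data : List Int), Dom_part_2 data → Spec_part_2 data (part_2 data)

-- ===== LEMMAS AND PROOFS =====

-- the tail of the prefix list, starting from absolute position p
def pvTailPrefix (p : Int) : List Int → List Int
  | [] => []
  | y :: ys => (p + y) :: pvTailPrefix (p + y) ys

-- A's per-step increment (with position reduced mod 100) equals B's branchless summand
theorem step_amount (p y : Int) :
    (if p % 100 + y > 0 then PySem.Int.floordiv (p % 100 + y) 100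
     else PySem.Int.floordiv |p % 100 + y| 100 + (if p % 100 ≠ 0 then 1 else 0))
      = part2AltCross p (p + y) := by
  simp only [part2AltCross, max_def,
    PySem.Int.floordiv_eq_ediv_of_pos (by norm_num : (0:Int) < 100)]
  rcases abs_cases (p % 100 + y) with ⟨ha, _⟩ | ⟨ha, _⟩ <;> rw [ha] <;>
    split_ifs <;> omega

theorem fold_eq (data : List Int) : ∀ (p z : Int),
    (data.foldl part2Step (p % 100, z)).2
      = z + ((((p :: pvTailPrefix p data).zip (pvTailPrefix p data)).map
          (fun q => part2AltCross q.1 q.2)).sum) := by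
  induction data with
  | nil => intro p z; simp [pvTailPrefix]
  | cons y ys ih =>
    intro p z
    have hmod : PySem.Int.mod (p % 100 + y) 100 = (p + y) % 100 := by
      rw [PySem.Int.mod_eq_emod_of_pos (by norm_num : (0:Int) < 100)]; omega
    have hstep : part2Step (p % 100, z) y = ((p + y) % 100, z + part2AltCross p (p + y)) := by
      simp only [part2Step, Prod.mk.injEq]
      refine ⟨hmod, ?_⟩
      rw [← step_amount p y]
      split_ifs <;> ring
    simp only [List.foldl_cons, hstep, pvTailPrefix, List.zip_cons_cons, List.map_cons,
      List.sum_cons]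
    rw [ih (p + y) (z + part2AltCross p (p + y))]
    ring

theorem prefix_eq (data : List Int) : ∀ (acc : List Int) (p : Int),
    data.foldl (fun acc y => acc ++ [acc.getLast! + y]) (acc ++ [p])
      = acc ++ [p] ++ pvTailPrefix p data := by
  induction data with
  | nil => intro acc p; simp [pvTailPrefix]
  | cons y ys ih =>
    intro acc p
    simp only [List.foldl_cons, pvTailPrefix]
    rw [show (acc ++ [p]).getLast! = p from by simp,
        show acc ++ [p] ++ [p + y] = (acc ++ [p]) ++ [p + y] from rfl,
        ih (acc ++ [p]) (p + y)]
    simp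

-- ===== VERDICT (by name: the statement is the Claim_ definition above) =====
theorem part_2_spec : Claim_equal_part_2 := by
  intro data _
  unfold Spec_part_2 part_2 part_2_alt part2AltPrefix
  have hp : data.foldl (fun acc y => acc ++ [acc.getLast! + y]) [50]
      = 50 :: pvTailPrefix 50 data := by
    have := prefix_eq data [] 50
    simpa using this
  rw [hp]
  have := fold_eq data 50 0
  norm_num at this
  simpa using this
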